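-- pv_equiv track=rewrite | github.com/ZS167275/DCID-2023 | 200.lgb_split_month.py | calc_max_coutinut_times
-- ===== SOURCE A (Python) =====
-- def calc_max_coutinut_times(a, b=1):
--     t = 0
--     w = 1
--     for k, v in enumerate(a):
--         if k > 0:
--             if v == b and a[k - 1] == b:
--                 t += 1
--                 if w < t:
--                     w = t
--             else:
--                 t = 1
--     return w
-- ===== SOURCE B (Python) =====
-- def calc_max_coutinut_times(a, b=1):
--     # run-length scan: collect lengths of maximal runs equal to b, then their maximum with a floor of one
--     runs = []
--     i, n = 0, len(a)
--     while i < n: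
--         j = i + 1
--         while j < n and a[j] == a[i]:
--             j += 1
--         if a[i] == b:
--             runs.append(j - i)
--         i = j
--     return max(runs + [1])
-- ===== Notes on version B (the rewrite author's own statement) =====
-- stated objective: alternative
-- what changed: B replaces A's index/look-back counter pass with a run-length scan that collects the lengths of maximal runs equal to b and returns their maximum with a floor of one; B also fixes A's off-by-one on a leading run of b.
-- intended difference: On inputs whose leading run of b has length p >= 2 and strictly exceeds every later run of b, A returns p-1 (its counter t starts at 0 instead of 1 for the first run) while B returns p, the true maximal run length, which is the intended value. — e.g. on calc_max_coutinut_times([1, 1], 1): A returns 1, B returns 2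
import Mathlib
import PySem

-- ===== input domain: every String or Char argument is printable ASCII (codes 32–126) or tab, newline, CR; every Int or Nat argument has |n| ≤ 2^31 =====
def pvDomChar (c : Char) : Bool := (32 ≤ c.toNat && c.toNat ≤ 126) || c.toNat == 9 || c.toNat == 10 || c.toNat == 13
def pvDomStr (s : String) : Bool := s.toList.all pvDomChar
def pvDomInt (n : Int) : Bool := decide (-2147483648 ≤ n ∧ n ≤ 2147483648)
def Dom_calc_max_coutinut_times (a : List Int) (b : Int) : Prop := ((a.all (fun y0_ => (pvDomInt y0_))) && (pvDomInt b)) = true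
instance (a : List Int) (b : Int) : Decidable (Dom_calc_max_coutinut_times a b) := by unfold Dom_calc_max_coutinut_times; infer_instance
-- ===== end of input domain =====

-- B replaces A's look-back counter pass with a run-length scan (collect lengths of maximal
-- runs equal to b, then max with floor 1); B fixes A's off-by-one on a leading run of b.

-- ===== PORT A =====
-- a[k-1] is ported with pyGetD (default 0): the branch only runs for k > 0, where the index is always in range.
def calc_max_coutinut_times (a : List Int) (b : Int) : Int :=
  ((PySem.List.enumerate a 0).foldl
    (fun (st : Int × Int) (kv : Int × Int) =>
      if kv.1 > 0 then
        if kv.2 = b ∧ PySem.List.pyGetD a (kv.1 - 1) 0 = b then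
          (st.1 + 1, if st.2 < st.1 + 1 then st.1 + 1 else st.2)
        else (1, st.2)
      else st)
    (0, 1)).2

-- ===== PORT B =====
-- leading count of elements equal to c (B's inner while loop)
def pvPre (c : Int) : List Int → Nat
  | [] => 0
  | x :: xs => if x = c then pvPre c xs + 1 else 0

-- B's outer while loop: collect the lengths of the maximal runs whose value is b
-- (structural recursion on a fuel = list length, so the definition kernel-reduces)
def pvRunsF (b : Int) : Nat → List Int → List Int
  | _, [] => []
  | 0, _ :: _ => []
  | n + 1, v :: rest =>
      if v = b then ((1 + pvPre v rest : Nat) : Int) :: pvRunsF b n (rest.drop (pvPre v rest))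
      else pvRunsF b n (rest.drop (pvPre v rest))

def pvRuns (b : Int) (l : List Int) : List Int := pvRunsF b l.length l

-- max(runs + [1]); the list is nonempty so Python's max never raises, .getD 1 is never used
def calc_max_coutinut_times_alt (a : List Int) (b : Int) : Int :=
  (PySem.List.max? (pvRuns b a ++ [1]) (fun x => x)).getD 1

-- ===== PRECONDITION & SPEC =====
-- On inputs whose leading run of b has length p ≥ 2 strictly exceeding every later run of b,
-- A returns p-1 (its counter t starts at 0 instead of 1 on the first run) while B returns p,
-- the true maximal run length, which is the intended value.
def D_calc_max_coutinut_times (a : List Int) (b : Int) : Prop :=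
  let p := (a.takeWhile (fun x => x == b)).length
  2 ≤ p ∧ ¬ List.replicate p b <:+: a.drop p
instance (a : List Int) (b : Int) : Decidable (D_calc_max_coutinut_times a b) := by
  unfold D_calc_max_coutinut_times; infer_instance

def Spec_calc_max_coutinut_times (a : List Int) (b : Int) (out : Int) : Prop :=
  ¬ D_calc_max_coutinut_times a b → out = calc_max_coutinut_times_alt a b
instance (a : List Int) (b : Int) (out : Int) : Decidable (Spec_calc_max_coutinut_times a b out) := by
  unfold Spec_calc_max_coutinut_times; infer_instance

def pvDiffWitness_calc_max_coutinut_times : List Int × Int := ([1, 1], 1)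
def pvDiffWitnessOut_calc_max_coutinut_times : Int × Int := (1, 2)

-- ===== CLAIM (what is proved, stated in full; the proofs are below) =====
def Claim_unchanged_calc_max_coutinut_times : Prop := ∀ (a : List Int) (b : Int), Dom_calc_max_coutinut_times a b → Spec_calc_max_coutinut_times a b (calc_max_coutinut_times a b)
def Claim_changed_calc_max_coutinut_times : Prop := Dom_calc_max_coutinut_times (pvDiffWitness_calc_max_coutinut_times.1) (pvDiffWitness_calc_max_coutinut_times.2) ∧ D_calc_max_coutinut_times (pvDiffWitness_calc_max_coutinut_times.1) (pvDiffWitness_calc_max_coutinut_times.2) ∧ calc_max_coutinut_times (pvDiffWitness_calc_max_coutinut_times.1) (pvDiffWitness_calc_max_coutinut_times.2) = pvDiffWitnessOut_calc_max_coutinut_times.1 ∧ calc_max_coutinut_times_alt (pvDiffWitness_calc_max_coutinut_times.1) (pvDiffWitness_calc_max_coutinut_times.2) = pvDiffWitnessOut_calc_max_coutinut_times.2 ∧ pvDiffWitnessOut_calc_max_coutinut_times.1 ≠ pvDiffWitnessOut_calc_max_coutinut_times.2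
def Claim_exact_calc_max_coutinut_times : Prop := ∀ (a : List Int) (b : Int), Dom_calc_max_coutinut_times a b → D_calc_max_coutinut_times a b → calc_max_coutinut_times a b ≠ calc_max_coutinut_times_alt a b

-- ===== LEMMAS AND PROOFS =====

-- drop-structured longest-run function, convenient for the proofs
def pvMaxRunF (b : Int) : Nat → List Int → Int
  | _, [] => 0
  | 0, _ :: _ => 0
  | n + 1, x :: xs =>
      if x = b then max ((1 + pvPre b xs : Nat) : Int) (pvMaxRunF b n (xs.drop (pvPre b xs)))
      else pvMaxRunF b n xs

def pvMaxRun (b : Int) (l : List Int) : Int := pvMaxRunF b l.length l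

theorem pvRunsF_fuel (b : Int) : ∀ (n m : Nat) (l : List Int), l.length ≤ n → l.length ≤ m →
    pvRunsF b n l = pvRunsF b m l := by
  intro n
  induction n with
  | zero =>
    intro m l h _
    cases l with
    | nil => cases m <;> rfl
    | cons v rest => simp at h
  | succ n ih =>
    intro m l h hm
    cases l with
    | nil => cases m <;> rfl
    | cons v rest =>
      cases m with
      | zero => simp at hm
      | succ m =>
        simp only [pvRunsF]
        have hd : (rest.drop (pvPre v rest)).length ≤ n := by
          simp only [List.length_drop]; simp at h; omega
        have hd2 : (rest.drop (pvPre v rest)).length ≤ m := by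
          simp only [List.length_drop]; simp at hm; omega
        rw [ih _ _ hd hd2]

theorem pvRuns_cons (b v : Int) (rest : List Int) :
    pvRuns b (v :: rest) =
      if v = b then ((1 + pvPre v rest : Nat) : Int) :: pvRuns b (rest.drop (pvPre v rest))
      else pvRuns b (rest.drop (pvPre v rest)) := by
  unfold pvRuns
  simp only [List.length_cons, pvRunsF]
  rw [pvRunsF_fuel b rest.length (rest.drop (pvPre v rest)).length]
  · simp only [List.length_drop]; omega
  · rfl

theorem pvMaxRunF_fuel (b : Int) : ∀ (n m : Nat) (l : List Int), l.length ≤ n → l.length ≤ m →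
    pvMaxRunF b n l = pvMaxRunF b m l := by
  intro n
  induction n with
  | zero =>
    intro m l h _
    cases l with
    | nil => cases m <;> rfl
    | cons v rest => simp at h
  | succ n ih =>
    intro m l h hm
    cases l with
    | nil => cases m <;> rfl
    | cons v rest =>
      cases m with
      | zero => simp at hm
      | succ m =>
        simp only [pvMaxRunF]
        have h' : rest.length ≤ n := by simp at h; omega
        have hm' : rest.length ≤ m := by simp at hm; omega
        have hd : (rest.drop (pvPre b rest)).length ≤ n := by
          simp only [List.length_drop]; omega
        have hd2 : (rest.drop (pvPre b rest)).length ≤ m := by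
          simp only [List.length_drop]; omega
        rw [ih _ _ hd hd2, ih _ _ h' hm']

theorem pvMaxRun_cons (b x : Int) (xs : List Int) :
    pvMaxRun b (x :: xs) =
      if x = b then max ((1 + pvPre b xs : Nat) : Int) (pvMaxRun b (xs.drop (pvPre b xs)))
      else pvMaxRun b xs := by
  unfold pvMaxRun
  simp only [List.length_cons, pvMaxRunF]
  rw [pvMaxRunF_fuel b xs.length (xs.drop (pvPre b xs)).length,
      pvMaxRunF_fuel b xs.length xs.length]
  · rfl
  · rfl
  · simp only [List.length_drop]; omega
  · rfl

-- A's loop after its first iteration, as a recursion over the remaining list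
def loopA (b : Int) : Int → Int → Int → List Int → Int
  | _, _, w, [] => w
  | prev, t, w, v :: l =>
      if v = b ∧ prev = b then loopA b v (t + 1) (if w < t + 1 then t + 1 else w) l
      else loopA b v 1 w l

theorem pvMaxRunF_nonneg (b : Int) : ∀ (n : Nat) (l : List Int), 0 ≤ pvMaxRunF b n l := by
  intro n
  induction n with
  | zero => intro l; cases l <;> simp [pvMaxRunF]
  | succ n ih =>
    intro l
    cases l with
    | nil => simp [pvMaxRunF]
    | cons x xs =>
      simp only [pvMaxRunF]
      split
      · exact le_max_of_le_left (by positivity)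
      · exact ih xs

theorem pvMaxRun_nonneg (b : Int) (l : List Int) : 0 ≤ pvMaxRun b l :=
  pvMaxRunF_nonneg b l.length l

theorem foldA_eq (b : Int) : ∀ (l pre : List Int) (prev t w : Int),
    ((PySem.List.enumerate l ((pre.length : Int) + 1)).foldl
      (fun (st : Int × Int) (kv : Int × Int) =>
        if kv.1 > 0 then
          if kv.2 = b ∧ PySem.List.pyGetD (pre ++ prev :: l) (kv.1 - 1) 0 = b then
            (st.1 + 1, if st.2 < st.1 + 1 then st.1 + 1 else st.2)
          else (1, st.2)
        else st)
      (t, w)).2 = loopA b prev t w l := by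
  intro l
  induction l with
  | nil => intro pre prev t w; simp [PySem.List.enumerate, loopA]
  | cons v l' ih =>
    intro pre prev t w
    rw [PySem.List.enumerate_cons, List.foldl_cons]
    have hpos : (0 : Int) < (pre.length : Int) + 1 := by positivity
    have hidx : PySem.List.pyGetD (pre ++ prev :: v :: l') ((pre.length : Int) + 1 - 1) 0 = prev := by
      simp
    have harr : pre ++ prev :: v :: l' = (pre ++ [prev]) ++ v :: l' := by simp
    have hstart : ((pre.length : Int) + 1) + 1 = ((pre ++ [prev]).length : Int) + 1 := by
      simp
    simp only [gt_iff_lt, hpos, if_true, hidx, loopA]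
    by_cases h : v = b ∧ prev = b
    · simp only [if_pos h]
      rw [hstart, harr]
      exact ih (pre ++ [prev]) v (t + 1) _
    · simp only [if_neg h]
      rw [hstart, harr]
      exact ih (pre ++ [prev]) v 1 w

theorem A_eq (a : List Int) (b : Int) :
    calc_max_coutinut_times a b = (match a with | [] => 1 | x :: l => loopA b x 0 1 l) := by
  cases a with
  | nil => rfl
  | cons x l =>
    show (_ : Int) = loopA b x 0 1 l
    unfold calc_max_coutinut_times
    rw [PySem.List.enumerate_cons, List.foldl_cons]
    simp only [gt_iff_lt, lt_irrefl, if_false]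
    have h0 : (0 : Int) + 1 = (([] : List Int).length : Int) + 1 := by simp
    rw [h0]
    exact foldA_eq b l [] x 0 1

-- dropping a leading run of non-b values does not change the maximal b-run
theorem pvMaxRun_drop (b c : Int) (hc : c ≠ b) : ∀ (l : List Int),
    pvMaxRun b (l.drop (pvPre c l)) = pvMaxRun b l := by
  intro l
  induction l with
  | nil => rfl
  | cons y ys ih =>
    by_cases hy : y = c
    · subst hy
      simp only [pvPre]
      rw [pvMaxRun_cons, if_neg hc]
      exact ih
    · simp only [pvPre, if_neg hy, List.drop_zero]

theorem loopA_char (b : Int) : ∀ (l : List Int) (prev t w : Int), 0 ≤ t → 1 ≤ w →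
    loopA b prev t w l =
      if prev = b then
        max (max w (if pvPre b l ≠ 0 then t + (pvPre b l : Int) else 0))
            (pvMaxRun b (l.drop (pvPre b l)))
      else max w (pvMaxRun b l) := by
  intro l
  induction l with
  | nil =>
    intro prev t w ht hw
    simp only [loopA, pvPre, List.drop_zero]
    have h0 : pvMaxRun b [] = 0 := rfl
    rw [h0]
    split_ifs <;> omega
  | cons v l' ih =>
    intro prev t w ht hw
    simp only [loopA]
    have hM := pvMaxRun_nonneg b (l'.drop (pvPre b l'))
    by_cases hv : v = b
    · by_cases hp : prev = b
      · have hcond : v = b ∧ prev = b := ⟨hv, hp⟩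
        simp only [if_pos hcond]
        rw [ih v (t + 1) _ (by omega) (by split_ifs <;> omega)]
        subst hv
        simp only [if_pos hp, pvPre, List.drop_succ_cons, if_true]
        split_ifs <;> push_cast <;> omega
      · have hcond : ¬ (v = b ∧ prev = b) := by tauto
        simp only [if_neg hcond]
        rw [ih v 1 w (by omega) hw]
        subst hv
        simp only [if_neg hp, pvPre, pvMaxRun_cons]
        split_ifs <;> push_cast <;> omega
    · have hcond : ¬ (v = b ∧ prev = b) := by tauto
      simp only [if_neg hcond]
      rw [ih v 1 w (by omega) hw]
      simp only [if_neg hv, pvPre, List.drop_zero]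
      rw [pvMaxRun_cons, if_neg hv]
      have hM' := pvMaxRun_nonneg b l'
      split_ifs <;> omega

theorem runs_fold (b : Int) : ∀ (n : Nat) (a : List Int), a.length ≤ n → ∀ (i : Int), 0 ≤ i →
    (pvRuns b a).foldl max i = max i (pvMaxRun b a) := by
  intro n
  induction n with
  | zero =>
    intro a h i hi
    cases a with
    | nil => show i = max i (pvMaxRun b []); show i = max i 0; omega
    | cons v rest => simp at h
  | succ n ih =>
    intro a h i hi
    cases a with
    | nil => show i = max i (pvMaxRun b []); show i = max i 0; omega
    | cons v rest =>
      have hlen : rest.length ≤ n := by simp at h; omega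
      have hdlen : (rest.drop (pvPre v rest)).length ≤ n := by
        simp only [List.length_drop]; omega
      rw [pvRuns_cons, pvMaxRun_cons]
      by_cases hv : v = b
      · subst hv
        simp only [if_true, List.foldl_cons]
        rw [ih _ hdlen _ (by positivity)]
        have hM := pvMaxRun_nonneg v (rest.drop (pvPre v rest))
        push_cast
        omega
      · simp only [if_neg hv]
        rw [ih _ hdlen _ hi, pvMaxRun_drop b v hv rest]

theorem foldl_max_init (i : Int) : ∀ (rs : List Int) (j : Int),
    rs.foldl max (max i j) = max i (rs.foldl max j) := by
  intro rs
  induction rs with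
  | nil => intro j; rfl
  | cons r rs ih =>
    intro j
    rw [List.foldl_cons, List.foldl_cons, max_assoc, ih (max j r)]

theorem B_eq (a : List Int) (b : Int) :
    calc_max_coutinut_times_alt a b = max 1 (pvMaxRun b a) := by
  have h := runs_fold b a.length a le_rfl 1 (by norm_num)
  unfold calc_max_coutinut_times_alt
  cases hr : pvRuns b a with
  | nil =>
    rw [hr] at h
    rw [List.nil_append, show ([1] : List Int) = 1 :: [] from rfl, PySem.List.max?_id_cons]
    simpa using h
  | cons r rs =>
    rw [hr] at h
    rw [List.cons_append, PySem.List.max?_id_cons, Option.getD_some, List.foldl_append]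
    rw [List.foldl_cons] at h
    rw [foldl_max_init 1 rs r] at h
    show max (rs.foldl max r) 1 = max 1 (pvMaxRun b a)
    omega

-- A in closed form
theorem A_char (a : List Int) (b : Int) :
    calc_max_coutinut_times a b =
      (match a with
       | [] => 1
       | x :: l =>
         if x = b then
           max (max 1 ((pvPre b l : Int))) (pvMaxRun b (l.drop (pvPre b l)))
         else max 1 (pvMaxRun b l)) := by
  rw [A_eq]
  cases a with
  | nil => rfl
  | cons x l =>
    show loopA b x 0 1 l = _
    rw [loopA_char b l x 0 1 le_rfl le_rfl]
    have hM := pvMaxRun_nonneg b (l.drop (pvPre b l))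
    by_cases hx : x = b
    · simp only [if_pos hx]
      split_ifs <;> omega
    · simp only [if_neg hx]

-- ===== VERDICT (by name: the statement is the Claim_ definition above) =====
theorem takeWhile_len_eq (b : Int) : ∀ (l : List Int),
    (l.takeWhile (fun x => x == b)).length = pvPre b l := by
  intro l
  induction l with
  | nil => rfl
  | cons x xs ih =>
    by_cases hx : x = b
    · simp [hx, pvPre, ih]
    · simp [hx, pvPre]

-- prefix of p b's in replicate k b ++ rest (rest not starting with b) forces p ≤ k
theorem prefix_repl (b : Int) (rest : List Int) (hr : rest.head? ≠ some b) (k p : Nat)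
    (h : List.replicate p b <+: List.replicate k b ++ rest) : p ≤ k := by
  by_contra hp
  push Not at hp
  rw [List.prefix_iff_eq_take, List.length_replicate, List.take_append, List.take_replicate,
      List.length_replicate] at h
  have hmin : min p k = k := by omega
  rw [hmin] at h
  have h2 : List.replicate k b ++ List.replicate (p - k) b
      = List.replicate k b ++ List.take (p - k) rest := by
    rw [← List.replicate_add]
    have : k + (p - k) = p := by omega
    rw [this]
    exact h
  have h3 : List.replicate (p - k) b = List.take (p - k) rest := List.append_cancel_left h2
  cases hrest : rest with
  | nil =>
    rw [hrest] at h3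
    simp at h3
    omega
  | cons y ys =>
    rw [hrest] at h3
    have hpk : p - k = (p - k - 1) + 1 := by omega
    rw [hpk] at h3
    simp [List.replicate_succ, List.take_succ_cons] at h3
    rw [hrest] at hr
    simp at hr
    exact hr h3.1.symm

theorem infix_repl_aux (b : Int) (rest : List Int) (hr : rest.head? ≠ some b) :
    ∀ (k p : Nat), (List.replicate p b <:+: List.replicate k b ++ rest)
      ↔ (p ≤ k ∨ List.replicate p b <:+: rest) := by
  intro k
  induction k with
  | zero =>
    intro p
    simp only [List.replicate, List.nil_append, Nat.le_zero]
    constructor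
    · intro h; right; exact h
    · rintro (h | h)
      · subst h; exact List.nil_infix
      · exact h
  | succ k ih =>
    intro p
    rw [List.replicate_succ, List.cons_append, List.infix_cons_iff]
    constructor
    · rintro (h | h)
      · rw [← List.cons_append, ← List.replicate_succ] at h
        left
        exact prefix_repl b rest hr (k + 1) p h
      · rcases (ih p).mp h with h' | h'
        · left; omega
        · right; exact h'
    · rintro (h | h)
      · by_cases hpk : p ≤ k
        · right; exact ((ih p).mpr (Or.inl hpk))
        · left
          have hp : p = k + 1 := by omega
          subst hp
          rw [← List.cons_append, ← List.replicate_succ]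
          exact List.prefix_append _ _
      · right; exact ((ih p).mpr (Or.inr h))

theorem pvPre_take (b : Int) : ∀ (l : List Int),
    l.take (pvPre b l) = List.replicate (pvPre b l) b := by
  intro l
  induction l with
  | nil => rfl
  | cons x xs ih =>
    by_cases hx : x = b
    · subst hx
      simp [pvPre, List.take_succ_cons, List.replicate_succ, ih]
    · simp [pvPre, if_neg hx]

theorem pvPre_drop_head (b : Int) : ∀ (l : List Int),
    (l.drop (pvPre b l)).head? ≠ some b := by
  intro l
  induction l with
  | nil => simp
  | cons x xs ih =>
    by_cases hx : x = b
    · simp only [pvPre, if_pos hx, List.drop_succ_cons]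
      exact ih
    · simp only [pvPre, if_neg hx, List.drop_zero, List.head?_cons]
      simp [hx]

theorem split_repl (b x : Int) (xs : List Int) (hx : x = b) :
    x :: xs = List.replicate (pvPre b xs + 1) b ++ xs.drop (pvPre b xs) := by
  conv_lhs => rw [← List.take_append_drop (pvPre b xs) xs]
  rw [← List.cons_append, pvPre_take b xs, List.replicate_succ, hx]

theorem infix_repl (b : Int) : ∀ (n : Nat) (l : List Int), l.length ≤ n → ∀ (p : Nat),
    (List.replicate p b <:+: l) ↔ ((p : Int) ≤ pvMaxRun b l) := by
  intro n
  induction n with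
  | zero =>
    intro l h p
    cases l with
    | nil =>
      show _ ↔ (p : Int) ≤ 0
      constructor
      · intro hin
        have := List.eq_nil_of_infix_nil hin
        have hp : p = 0 := by simpa using this
        omega
      · intro hp
        have hp0 : p = 0 := by omega
        subst hp0
        exact List.nil_infix
    | cons v rest => simp at h
  | succ n ih =>
    intro l h p
    cases l with
    | nil =>
      show _ ↔ (p : Int) ≤ 0
      constructor
      · intro hin
        have := List.eq_nil_of_infix_nil hin
        have hp : p = 0 := by simpa using this
        omega
      · intro hp
        have hp0 : p = 0 := by omega
        subst hp0
        exact List.nil_infix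
    | cons x xs =>
      have hxs : xs.length ≤ n := by simp at h; omega
      have hdlen : (xs.drop (pvPre b xs)).length ≤ n := by
        simp only [List.length_drop]; omega
      rw [pvMaxRun_cons]
      by_cases hx : x = b
      · rw [if_pos hx, split_repl b x xs hx,
            infix_repl_aux b (xs.drop (pvPre b xs)) (pvPre_drop_head b xs) (pvPre b xs + 1) p,
            ih _ hdlen p]
        have := pvMaxRun_nonneg b (xs.drop (pvPre b xs))
        constructor
        · rintro (h' | h') <;> push_cast <;> omega
        · intro h'
          push_cast at h'
          by_cases hpq : p ≤ pvPre b xs + 1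
          · exact Or.inl hpq
          · right; omega
      · rw [if_neg hx, List.infix_cons_iff]
        constructor
        · rintro (h' | h')
          · cases p with
            | zero =>
              have := pvMaxRun_nonneg b xs
              push_cast
              omega
            | succ p' =>
              rw [List.replicate_succ] at h'
              rw [List.cons_prefix_cons] at h'
              exact absurd h'.1.symm hx
          · exact (ih xs hxs p).mp h'
        · intro h'
          exact Or.inr ((ih xs hxs p).mpr h')

theorem D_iff (a : List Int) (b : Int) :
    D_calc_max_coutinut_times a b ↔
      (2 ≤ pvPre b a ∧ pvMaxRun b (a.drop (pvPre b a)) < (pvPre b a : Int)) := by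
  unfold D_calc_max_coutinut_times
  show (2 ≤ (a.takeWhile (fun x => x == b)).length ∧
      ¬ List.replicate ((a.takeWhile (fun x => x == b)).length) b
        <:+: a.drop ((a.takeWhile (fun x => x == b)).length)) ↔ _
  rw [takeWhile_len_eq b a,
      infix_repl b (a.drop (pvPre b a)).length (a.drop (pvPre b a)) le_rfl (pvPre b a)]
  constructor <;> (rintro ⟨h1, h2⟩; exact ⟨h1, by omega⟩)

theorem calc_max_coutinut_times_spec : Claim_unchanged_calc_max_coutinut_times := by
  intro a b _ hnD
  rw [D_iff] at hnD
  push Not at hnD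
  rw [A_char, B_eq]
  cases a with
  | nil => show (1 : Int) = max 1 (pvMaxRun b []); show (1 : Int) = max 1 0; omega
  | cons x l =>
    by_cases hx : x = b
    · subst hx
      simp only [pvPre, if_true, List.drop_succ_cons] at hnD
      simp only [if_true]
      rw [pvMaxRun_cons]
      simp only [if_true]
      have hM := pvMaxRun_nonneg x (l.drop (pvPre x l))
      have := hnD
      push_cast
      by_cases h2 : 2 ≤ pvPre x l + 1
      · have := hnD h2; push_cast at this; omega
      · omega
    · simp only [if_neg hx]
      rw [pvMaxRun_cons, if_neg hx]

theorem calc_max_coutinut_times_changed : Claim_changed_calc_max_coutinut_times := by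
  unfold Claim_changed_calc_max_coutinut_times; decide

theorem calc_max_coutinut_times_tight : Claim_exact_calc_max_coutinut_times := by
  intro a b _ hD
  rw [D_iff] at hD
  obtain ⟨h2, hM⟩ := hD
  rw [A_char, B_eq]
  cases a with
  | nil => simp [pvPre] at h2
  | cons x l =>
    by_cases hx : x = b
    · subst hx
      simp only [pvPre, if_true, List.drop_succ_cons] at h2 hM
      simp only [if_true]
      rw [pvMaxRun_cons]
      simp only [if_true]
      have hM0 := pvMaxRun_nonneg x (l.drop (pvPre x l))
      push_cast at hM ⊢
      omega
    · simp only [pvPre, if_neg hx] at h2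
      omega
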